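-- pv_equiv track=rewrite | github.com/futianfan/interpretable_healthcare | update_rule/src/pure_rule_learning.py | judge_a_rule_a_seq
-- ===== SOURCE A (Python) =====
-- def judge_a_rule_a_seq(rule, seqs):
-- 	if len(rule) == 0:
-- 		return True
-- 	for i in rule:
-- 		ii = i
-- 		if (rule[i] == 1 and ii not in seqs) or (rule[i] == 0 and ii in seqs):  ###*****************
-- 			return False
-- 	return True
-- ===== SOURCE B (Python) =====
-- def judge_a_rule_a_seq(rule, seqs):
-- 	ones_total = sum(1 for v in rule.values() if v == 1)
-- 	seen = set()
-- 	for x in seqs: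
-- 		v = rule.get(x)
-- 		if v == 0:
-- 			return False
-- 		if v == 1:
-- 			seen.add(x)
-- 	return len(seen) == ones_total
-- ===== Notes on version B (the rewrite author's own statement) =====
-- stated objective: alternative
-- what changed: Inverts the traversal: instead of scanning the rule's keys and testing each against seqs, B scans seqs once looking each element up in the rule (fail-fast on a 0-valued hit, collect distinct 1-valued hits) and verifies the required items by a cardinality comparison with the total number of 1-valued rule entries.
import Mathlib
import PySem

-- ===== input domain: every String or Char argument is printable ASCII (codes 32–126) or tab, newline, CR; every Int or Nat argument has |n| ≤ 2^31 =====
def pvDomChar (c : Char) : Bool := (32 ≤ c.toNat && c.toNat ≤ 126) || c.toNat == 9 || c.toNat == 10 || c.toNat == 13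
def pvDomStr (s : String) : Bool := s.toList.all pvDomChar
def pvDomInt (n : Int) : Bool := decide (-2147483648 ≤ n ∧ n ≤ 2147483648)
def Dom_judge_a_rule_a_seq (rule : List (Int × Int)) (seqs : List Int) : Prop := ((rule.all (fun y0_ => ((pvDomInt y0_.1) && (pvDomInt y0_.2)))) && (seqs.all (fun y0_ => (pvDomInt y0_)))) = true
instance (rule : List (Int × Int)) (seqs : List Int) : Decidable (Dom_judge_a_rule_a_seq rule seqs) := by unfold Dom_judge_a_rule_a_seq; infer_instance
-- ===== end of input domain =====

-- B inverts the traversal: it scans seqs once, looking each element up in the rule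
-- (fail-fast on a 0-valued hit, collecting distinct 1-valued hits) and checks the
-- required items by comparing a count with the number of 1-valued rule entries.

-- ===== PORT A =====
-- 'for i in rule: … rule[i] …' with rule a dict: loop over the keys, looking each up.
def judgeLoopA (d : PySem.Dict Int Int) (seqs : List Int) : List Int → Bool
  | [] => true
  | k :: ks =>
    if (d.getD k 0 == 1 && !(seqs.contains k)) || (d.getD k 0 == 0 && seqs.contains k) then
      false
    else
      judgeLoopA d seqs ks

def judge_a_rule_a_seq (rule : List (Int × Int)) (seqs : List Int) : Bool :=
  let d := PySem.Dict.ofList rule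
  if d.size == 0 then true
  else judgeLoopA d seqs d.keys

-- ===== PORT B =====
-- 'for x in seqs: v = rule.get(x); if v == 0: return False; if v == 1: seen.add(x)'
def judgeLoopB (d : PySem.Dict Int Int) : List Int → PySem.Set Int → Option (PySem.Set Int)
  | [], seen => some seen
  | x :: xs, seen =>
    if d.get? x == some 0 then none
    else if d.get? x == some 1 then judgeLoopB d xs (PySem.Set.add seen x)
    else judgeLoopB d xs seen

def judge_a_rule_a_seq_alt (rule : List (Int × Int)) (seqs : List Int) : Bool :=
  let d := PySem.Dict.ofList rule
  let onesTotal := (d.values.filter (fun v => v == 1)).length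
  match judgeLoopB d seqs PySem.Set.empty with
  | none => false
  | some seen => PySem.Set.len seen == onesTotal

-- ===== PRECONDITION & SPEC =====
def Spec_judge_a_rule_a_seq (rule : List (Int × Int)) (seqs : List Int) (out : Bool) : Prop := out = judge_a_rule_a_seq_alt rule seqs
instance (rule : List (Int × Int)) (seqs : List Int) (out : Bool) : Decidable (Spec_judge_a_rule_a_seq rule seqs out) := by unfold Spec_judge_a_rule_a_seq; infer_instance

-- ===== CLAIM =====
def Claim_equal_judge_a_rule_a_seq : Prop := ∀ (rule : List (Int × Int)) (seqs : List Int), Dom_judge_a_rule_a_seq rule seqs → Spec_judge_a_rule_a_seq rule seqs (judge_a_rule_a_seq rule seqs)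

-- ===== LEMMAS AND PROOFS =====

-- A's loop over a key list is an 'all' of the per-key test on (key, looked-up value).
lemma judgeLoopA_eq_all (d : PySem.Dict Int Int) (seqs : List Int) (ks : List Int) :
    judgeLoopA d seqs ks =
      ks.all (fun k => !((d.getD k 0 == 1 && !(seqs.contains k)) || (d.getD k 0 == 0 && seqs.contains k))) := by
  induction ks with
  | nil => rfl
  | cons k ks ih =>
    simp only [judgeLoopA, List.all_cons, ← ih]
    cases h : ((d.getD k 0 == 1 && !(seqs.contains k)) || (d.getD k 0 == 0 && seqs.contains k)) <;>
      simp_all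

-- B's loop fails exactly when some element of the scanned list has rule value 0.
lemma judgeLoopB_eq_none_iff (d : PySem.Dict Int Int) (xs : List Int) (seen : PySem.Set Int) :
    judgeLoopB d xs seen = none ↔ ∃ x ∈ xs, d.get? x = some 0 := by
  induction xs generalizing seen with
  | nil => simp [judgeLoopB]
  | cons x xs ih =>
    simp only [judgeLoopB]
    split_ifs with h0 h1 <;> simp_all

-- When B's loop succeeds, the resulting collection holds exactly the initial elements
-- plus the scanned elements whose rule value is 1, and stays duplicate-free.
lemma judgeLoopB_some (d : PySem.Dict Int Int) (xs : List Int) (seen out : PySem.Set Int)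
    (h : judgeLoopB d xs seen = some out) (hnd : seen.Nodup) :
    out.Nodup ∧ ∀ y, y ∈ out ↔ y ∈ seen ∨ (y ∈ xs ∧ d.get? y = some 1) := by
  induction xs generalizing seen with
  | nil =>
    simp only [judgeLoopB, Option.some.injEq] at h
    subst h; exact ⟨hnd, by simp⟩
  | cons x xs ih =>
    simp only [judgeLoopB] at h
    split_ifs at h with h0 h1
    · obtain ⟨hnd', hmem⟩ := ih (PySem.Set.add seen x) h (PySem.Set.nodup_add seen x hnd)
      refine ⟨hnd', fun y => ?_⟩
      rw [hmem y]
      simp only [PySem.Set.mem_add, List.mem_cons]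
      constructor
      · rintro ((hy | rfl) | ⟨hy, hv⟩)
        · exact Or.inl hy
        · exact Or.inr ⟨Or.inl rfl, by simpa using h1⟩
        · exact Or.inr ⟨Or.inr hy, hv⟩
      · rintro (hy | ⟨(rfl | hy), hv⟩)
        · exact Or.inl (Or.inl hy)
        · exact Or.inl (Or.inr rfl)
        · exact Or.inr ⟨hy, hv⟩
    · obtain ⟨hnd', hmem⟩ := ih seen h hnd
      refine ⟨hnd', fun y => ?_⟩
      rw [hmem y]
      simp only [List.mem_cons]
      constructor
      · rintro (hy | ⟨hy, hv⟩)
        · exact Or.inl hy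
        · exact Or.inr ⟨Or.inr hy, hv⟩
      · rintro (hy | ⟨(rfl | hy), hv⟩)
        · exact Or.inl hy
        · exact absurd hv (by simpa using h1)
        · exact Or.inr ⟨hy, hv⟩

-- Two duplicate-free lists, one contained in the other pointwise via seqs, have equal
-- length iff every element of the larger one occurs in seqs (subset-by-cardinality).
lemma length_eq_iff_subset (seen K1 seqs : List Int)
    (hsn : seen.Nodup) (hkn : K1.Nodup)
    (hmem : ∀ y, y ∈ seen ↔ y ∈ seqs ∧ y ∈ K1) :
    seen.length = K1.length ↔ ∀ k ∈ K1, k ∈ seqs := by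
  have hsub : seen.toFinset ⊆ K1.toFinset := by
    intro y hy
    rw [List.mem_toFinset] at *
    exact ((hmem y).mp hy).2
  constructor
  · intro hlen k hk
    have hfin : seen.toFinset = K1.toFinset :=
      Finset.eq_of_subset_of_card_le hsub
        (by rw [List.toFinset_card_of_nodup hsn, List.toFinset_card_of_nodup hkn, hlen])
    have hk' : k ∈ K1.toFinset := List.mem_toFinset.mpr hk
    rw [← hfin] at hk'
    exact ((hmem k).mp (List.mem_toFinset.mp hk')).1
  · intro hall
    have hfin : seen.toFinset = K1.toFinset := by
      ext y
      simp only [List.mem_toFinset]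
      exact ⟨fun h => ((hmem y).mp h).2, fun h => (hmem y).mpr ⟨hall y h, h⟩⟩
    rw [← List.toFinset_card_of_nodup hsn, ← List.toFinset_card_of_nodup hkn, hfin]

theorem judge_a_rule_a_seq_spec_aux (rule : List (Int × Int)) (seqs : List Int) :
    judge_a_rule_a_seq rule seqs = judge_a_rule_a_seq_alt rule seqs := by
  unfold judge_a_rule_a_seq judge_a_rule_a_seq_alt
  set d := PySem.Dict.ofList rule with hd
  have hkeys : d.keys.Nodup := PySem.Dict.nodup_keys_ofList rule
  -- the size-0 guard of A is redundant: on an empty dict the loop returns true anyway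
  have hAguard : (if d.size == 0 then true else judgeLoopA d seqs d.keys) = judgeLoopA d seqs d.keys := by
    split_ifs with h
    · have hitems : d.items = [] := List.length_eq_zero_iff.mp (by simpa [PySem.Dict.size] using h)
      have : d.keys = [] := by simp [PySem.Dict.keys, hitems]
      simp [this, judgeLoopA]
    · rfl
  rw [hAguard, Bool.eq_iff_iff]
  -- characterisation of A over the items
  have hA : judgeLoopA d seqs d.keys = true ↔
      ∀ p ∈ d.items, (p.2 = 1 → p.1 ∈ seqs) ∧ (p.2 = 0 → p.1 ∉ seqs) := by
    rw [judgeLoopA_eq_all, PySem.Dict.items_eq_map_keys d hkeys 0]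
    simp only [List.all_eq_true, List.forall_mem_map, List.contains_eq_mem]
    constructor
    · intro h k hk
      have := h k hk
      by_cases h1 : d.getD k 0 = 1 <;> by_cases h0 : d.getD k 0 = 0 <;>
        by_cases hs : k ∈ seqs <;> simp_all
    · intro h k hk
      have := h k hk
      by_cases h1 : d.getD k 0 = 1 <;> by_cases h0 : d.getD k 0 = 0 <;>
        by_cases hs : k ∈ seqs <;> simp_all
  rw [hA]
  -- the 1-valued keys of the rule
  set K1 : List Int := (d.items.filter (fun p => p.2 == 1)).map (·.1) with hK1
  have hK1nodup : K1.Nodup := by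
    have hsl : K1.Sublist (d.items.map (·.1)) :=
      List.Sublist.map ((·.1) : Int × Int → Int)
        (List.filter_sublist (p := fun p => p.2 == 1) (l := d.items))
    exact List.Nodup.sublist hsl (by simpa [PySem.Dict.keys] using hkeys)
  have hK1mem : ∀ y, y ∈ K1 ↔ d.get? y = some 1 := by
    intro y
    rw [PySem.Dict.get?_eq_some_iff_mem_items d y 1 hkeys, hK1]
    simp only [List.mem_map, List.mem_filter, beq_iff_eq]
    constructor
    · rintro ⟨⟨a, b⟩, ⟨hp, hb⟩, rfl⟩
      simp only at hb
      subst hb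
      exact hp
    · intro hp
      exact ⟨(y, 1), ⟨hp, rfl⟩, rfl⟩
  have honesTotal : (d.values.filter (fun v => v == 1)).length = K1.length := by
    simp only [PySem.Dict.values, List.filter_map, List.length_map, hK1, Function.comp_def]
  -- run B's loop
  rcases hres : judgeLoopB d seqs PySem.Set.empty with _ | seen
  · -- B's loop failed: some x ∈ seqs has rule value 0, so A is false too
    simp only [hres]
    obtain ⟨x, hx, hx0⟩ := (judgeLoopB_eq_none_iff d seqs PySem.Set.empty).mp hres
    simp only [Bool.false_eq_true, iff_false]
    intro hall
    have hmemit : (x, (0 : Int)) ∈ d.items :=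
      (PySem.Dict.get?_eq_some_iff_mem_items d x 0 hkeys).mp hx0
    exact (hall (x, 0) hmemit).2 rfl hx
  · -- B's loop succeeded: no forbidden hits, and seen collects the satisfied 1-keys
    simp only [hres]
    obtain ⟨hsn, hmem⟩ := judgeLoopB_some d seqs PySem.Set.empty seen hres List.nodup_nil
    have hno0 : ∀ x ∈ seqs, d.get? x ≠ some 0 := by
      intro x hx hx0
      exact absurd ((judgeLoopB_eq_none_iff d seqs PySem.Set.empty).mpr ⟨x, hx, hx0⟩)
        (by rw [hres]; simp)
    have hmem' : ∀ y, y ∈ seen ↔ y ∈ seqs ∧ y ∈ K1 := by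
      intro y
      rw [hmem y, hK1mem y]
      simp [PySem.Set.empty]
    have hlen : (PySem.Set.len seen == ((d.values.filter (fun v => v == 1)).length : Int)) = true ↔
        seen.length = K1.length := by
      simp only [PySem.Set.len, honesTotal, beq_iff_eq]
      omega
    rw [hlen, length_eq_iff_subset seen K1 seqs hsn hK1nodup hmem']
    constructor
    · intro hall k hk
      have h1 : d.get? k = some 1 := (hK1mem k).mp hk
      have : (k, (1 : Int)) ∈ d.items := (PySem.Dict.get?_eq_some_iff_mem_items d k 1 hkeys).mp h1
      exact (hall (k, 1) this).1 rfl
    · intro hall p hp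
      constructor
      · intro hp1
        apply hall
        rw [hK1mem p.1]
        exact PySem.Dict.get?_of_mem_items d (by rw [← hp1]; exact hp) hkeys
      · intro hp0 hps
        exact hno0 p.1 hps (PySem.Dict.get?_of_mem_items d (by rw [← hp0]; exact hp) hkeys)

-- ===== VERDICT =====
theorem judge_a_rule_a_seq_spec : Claim_equal_judge_a_rule_a_seq := by
  intro rule seqs _
  exact judge_a_rule_a_seq_spec_aux rule seqs
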